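-- pv_equiv track=rewrite | github.com/onatozmenn/SentryWall | backend/app/api/routes/chat.py | _derive_audit_fields
-- ===== SOURCE A (Python) =====
-- from typing import List, cast
--
-- HIGH_RISK_TYPES = {"API Key", "TCKN", "Credit Card", "Payment"}
--
-- MEDIUM_RISK_TYPES = {"Email", "Phone", "IBAN", "Address"}
--
-- LOW_RISK_TYPES = {"IP Address"}
--
-- def _derive_audit_fields(redacted_items: List[str]) -> tuple[str, str, str]:
--     if not redacted_items:
--         return "None", "Low", "Allowed"
--
--     pii_detected = ",".join(redacted_items)
--
--     if any(item in HIGH_RISK_TYPES for item in redacted_items):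
--         return pii_detected, "High", "Blocked"
--
--     if any(item in MEDIUM_RISK_TYPES for item in redacted_items):
--         return pii_detected, "Medium", "Redacted"
--
--     if any(item in LOW_RISK_TYPES for item in redacted_items):
--         return pii_detected, "Low", "Redacted"
--
--     return pii_detected, "Medium", "Redacted"
-- ===== SOURCE B (Python) =====
-- from typing import List
--
-- _RANK = {
--     "API Key": 3, "TCKN": 3, "Credit Card": 3, "Payment": 3,
--     "Email": 2, "Phone": 2, "IBAN": 2, "Address": 2,
--     "IP Address": 1,
-- }
--
-- def _derive_audit_fields(redacted_items: List[str]) -> tuple[str, str, str]: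
--     if not redacted_items:
--         return "None", "Low", "Allowed"
--     pii_detected = ",".join(redacted_items)
--     best = 0
--     for item in redacted_items:
--         r = _RANK.get(item, 0)
--         if r > best:
--             best = r
--     if best == 3:
--         return pii_detected, "High", "Blocked"
--     if best == 1:
--         return pii_detected, "Low", "Redacted"
--     return pii_detected, "Medium", "Redacted"
-- ===== Notes on version B (the rewrite author's own statement) =====
-- stated objective: simpler
-- what changed: Replaces the three set-membership any-passes with one rank dict (High=3, Medium=2, Low=1, unknown=0) and a single max-tracking pass, mapping the max rank (with 0 and 2 both -> Medium/Redacted) to the label pair.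
import Mathlib
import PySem

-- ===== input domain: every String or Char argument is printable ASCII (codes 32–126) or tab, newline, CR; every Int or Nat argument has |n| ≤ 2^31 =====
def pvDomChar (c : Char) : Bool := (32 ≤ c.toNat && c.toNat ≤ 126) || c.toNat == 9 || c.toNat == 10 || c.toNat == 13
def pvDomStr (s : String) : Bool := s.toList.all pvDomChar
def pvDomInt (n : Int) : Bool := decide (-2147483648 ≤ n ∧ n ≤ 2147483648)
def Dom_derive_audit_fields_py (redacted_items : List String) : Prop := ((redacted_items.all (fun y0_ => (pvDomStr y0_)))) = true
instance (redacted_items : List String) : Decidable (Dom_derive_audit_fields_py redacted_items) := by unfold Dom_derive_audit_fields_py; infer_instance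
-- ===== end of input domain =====

-- B replaces A's three set-membership passes with one rank dictionary and a single max-tracking pass (simpler, one traversal).


-- ===== PORT A =====
def pvHighRiskTypes : PySem.Set String := PySem.Set.ofList ["API Key", "TCKN", "Credit Card", "Payment"]
def pvMediumRiskTypes : PySem.Set String := PySem.Set.ofList ["Email", "Phone", "IBAN", "Address"]
def pvLowRiskTypes : PySem.Set String := PySem.Set.ofList ["IP Address"]

def derive_audit_fields_py (redacted_items : List String) : String × String × String :=
  if redacted_items = [] then ("None", "Low", "Allowed")
  else
    let pii_detected := PySem.Str.join "," redacted_items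
    if redacted_items.any (fun item => pvHighRiskTypes.contains item) then
      (pii_detected, "High", "Blocked")
    else if redacted_items.any (fun item => pvMediumRiskTypes.contains item) then
      (pii_detected, "Medium", "Redacted")
    else if redacted_items.any (fun item => pvLowRiskTypes.contains item) then
      (pii_detected, "Low", "Redacted")
    else
      (pii_detected, "Medium", "Redacted")

-- ===== PORT B =====
def pvRank : PySem.Dict String Int := PySem.Dict.ofList
  [("API Key", 3), ("TCKN", 3), ("Credit Card", 3), ("Payment", 3),
   ("Email", 2), ("Phone", 2), ("IBAN", 2), ("Address", 2),
   ("IP Address", 1)]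

-- loop body of B's single pass: keep the larger of the running best and the item's rank
def pvStep (best : Int) (item : String) : Int :=
  let r := pvRank.getD item 0
  if r > best then r else best

def derive_audit_fields_py_alt (redacted_items : List String) : String × String × String :=
  if redacted_items = [] then ("None", "Low", "Allowed")
  else
    let pii_detected := PySem.Str.join "," redacted_items
    let best := redacted_items.foldl pvStep 0
    if best = 3 then (pii_detected, "High", "Blocked")
    else if best = 1 then (pii_detected, "Low", "Redacted")
    else (pii_detected, "Medium", "Redacted")

-- ===== PRECONDITION & SPEC =====
def Spec_derive_audit_fields_py (redacted_items : List String) (out : String × String × String) : Prop := out = derive_audit_fields_py_alt redacted_items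
instance (redacted_items : List String) (out : String × String × String) : Decidable (Spec_derive_audit_fields_py redacted_items out) := by unfold Spec_derive_audit_fields_py; infer_instance

-- ===== CLAIM (what is proved, stated in full; the proofs are below) =====
def Claim_equal_derive_audit_fields_py : Prop := ∀ (redacted_items : List String), Dom_derive_audit_fields_py redacted_items → Spec_derive_audit_fields_py redacted_items (derive_audit_fields_py redacted_items)

-- ===== LEMMAS AND PROOFS =====

-- rank of a single string: its value versus the membership tests of A, and its possible values
theorem pvRank_spec (s : String) :
    (pvRank.getD s 0 = 3 ↔ pvHighRiskTypes.contains s = true) ∧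
    (pvRank.getD s 0 = 2 ↔ pvMediumRiskTypes.contains s = true) ∧
    (pvRank.getD s 0 = 1 ↔ pvLowRiskTypes.contains s = true) ∧
    (pvRank.getD s 0 = 0 ∨ pvRank.getD s 0 = 1 ∨ pvRank.getD s 0 = 2 ∨ pvRank.getD s 0 = 3) := by
  by_cases h1 : s = "API Key"; · subst h1; decide
  by_cases h2 : s = "TCKN"; · subst h2; decide
  by_cases h3 : s = "Credit Card"; · subst h3; decide
  by_cases h4 : s = "Payment"; · subst h4; decide
  by_cases h5 : s = "Email"; · subst h5; decide
  by_cases h6 : s = "Phone"; · subst h6; decide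
  by_cases h7 : s = "IBAN"; · subst h7; decide
  by_cases h8 : s = "Address"; · subst h8; decide
  by_cases h9 : s = "IP Address"; · subst h9; decide
  have hmk : pvRank = PySem.Dict.mk
      [("API Key", 3), ("TCKN", 3), ("Credit Card", 3), ("Payment", 3),
       ("Email", 2), ("Phone", 2), ("IBAN", 2), ("Address", 2), ("IP Address", 1)] := by decide
  have hr : pvRank.getD s 0 = 0 := by
    rw [PySem.Dict.getD_eq_get?_getD, hmk]
    simp [PySem.Dict.get?, beq_iff_eq, Ne.symm h1, Ne.symm h2,
          Ne.symm h3, Ne.symm h4, Ne.symm h5, Ne.symm h6, Ne.symm h7, Ne.symm h8, Ne.symm h9]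
  have hH : pvHighRiskTypes.contains s = false := by
    have he : pvHighRiskTypes = ["API Key", "TCKN", "Credit Card", "Payment"] := by decide
    rw [he]; simp [List.contains_eq_mem, h1, h2, h3, h4]
  have hM : pvMediumRiskTypes.contains s = false := by
    have he : pvMediumRiskTypes = ["Email", "Phone", "IBAN", "Address"] := by decide
    rw [he]; simp [List.contains_eq_mem, h5, h6, h7, h8]
  have hL : pvLowRiskTypes.contains s = false := by
    have he : pvLowRiskTypes = ["IP Address"] := by decide
    rw [he]; simp [List.contains_eq_mem, h9]
  exact ⟨iff_of_false (by rw [hr]; norm_num) (by rw [hH]; exact Bool.false_ne_true),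
         iff_of_false (by rw [hr]; norm_num) (by rw [hM]; exact Bool.false_ne_true),
         iff_of_false (by rw [hr]; norm_num) (by rw [hL]; exact Bool.false_ne_true),
         Or.inl hr⟩

-- B's step function is max with the item's rank
theorem pvStep_eq (b : Int) (item : String) : pvStep b item = max b (pvRank.getD item 0) := by
  simp only [pvStep]
  split <;> omega

-- B's fold from any nonnegative accumulator, characterised by A's three any-tests
theorem pvFold_char (l : List String) : ∀ (b : Int), 0 ≤ b →
    l.foldl pvStep b
      = max b (if l.any (fun item => pvHighRiskTypes.contains item) then 3
               else if l.any (fun item => pvMediumRiskTypes.contains item) then 2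
               else if l.any (fun item => pvLowRiskTypes.contains item) then 1
               else 0) := by
  induction l with
  | nil => intro b hb; simp; omega
  | cons x l ih =>
    intro b hb
    obtain ⟨h3, h2, h1, hv⟩ := pvRank_spec x
    rw [List.foldl_cons, ih (pvStep b x) (by rw [pvStep_eq]; omega), pvStep_eq]
    by_cases hH : pvHighRiskTypes.contains x = true
    · have hr : pvRank.getD x 0 = 3 := h3.mpr hH
      simp only [List.any_cons, hH, Bool.true_or, if_true, hr]
      split_ifs <;> omega
    · have hH' : pvHighRiskTypes.contains x = false := by simpa using hH
      have hr3 : pvRank.getD x 0 ≠ 3 := fun h => hH (h3.mp h)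
      by_cases hM : pvMediumRiskTypes.contains x = true
      · have hr : pvRank.getD x 0 = 2 := h2.mpr hM
        simp only [List.any_cons, hH', hM, Bool.false_or, Bool.true_or, if_true, hr]
        split_ifs <;> omega
      · have hM' : pvMediumRiskTypes.contains x = false := by simpa using hM
        have hr2 : pvRank.getD x 0 ≠ 2 := fun h => hM (h2.mp h)
        by_cases hL : pvLowRiskTypes.contains x = true
        · have hr : pvRank.getD x 0 = 1 := h1.mpr hL
          simp only [List.any_cons, hH', hM', hL, Bool.false_or, Bool.true_or, if_true, hr]
          split_ifs <;> omega
        · have hL' : pvLowRiskTypes.contains x = false := by simpa using hL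
          have hr1 : pvRank.getD x 0 ≠ 1 := fun h => hL (h1.mp h)
          have hr : pvRank.getD x 0 = 0 := by rcases hv with h | h | h | h <;> first | exact h | exact absurd h (by assumption)
          simp only [List.any_cons, hH', hM', hL', Bool.false_or, hr]
          split_ifs <;> omega

-- ===== VERDICT (by name: the statement is the Claim_ definition above) =====
theorem derive_audit_fields_py_spec : Claim_equal_derive_audit_fields_py := by
  intro l _
  unfold Spec_derive_audit_fields_py derive_audit_fields_py derive_audit_fields_py_alt
  by_cases hnil : l = []
  · simp [hnil]
  · simp only [hnil, if_false]
    rw [pvFold_char l 0 (le_refl 0)]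
    split_ifs <;> simp_all
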